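-- pv_equiv track=rewrite | github.com/aap-hub/behavioral-exhaust | src/feature_definitions.py | extract_prior_failure_streak
-- ===== SOURCE A (Python) =====
-- def extract_prior_failure_streak(previous_results: list[bool]) -> int:
--     """Count consecutive ``False`` values at the *end* of the list.
--
--     An empty or ``None`` list yields 0.
--     """
--     if not previous_results:
--         return 0
--     streak = 0
--     for result in reversed(previous_results):
--         if result is False:
--             streak += 1
--         else:
--             break
--     return streak
-- ===== SOURCE B (Python) =====
-- def extract_prior_failure_streak(previous_results: list[bool]) -> int:
--     """Count consecutive ``False`` values at the *end* of the list.
--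
--     Forward single pass with a resettable counter instead of a reverse
--     scan with early break.  An empty or ``None`` list yields 0.
--     """
--     streak = 0
--     for result in previous_results or ():
--         streak = streak + 1 if result is False else 0
--     return streak
-- ===== Notes on version B (the rewrite author's own statement) =====
-- stated objective: alternative
-- what changed: Replaces the reverse scan with early break by a forward single pass that increments a counter on False and resets it to 0 otherwise; the final counter is the trailing-False run length.
import Mathlib
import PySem

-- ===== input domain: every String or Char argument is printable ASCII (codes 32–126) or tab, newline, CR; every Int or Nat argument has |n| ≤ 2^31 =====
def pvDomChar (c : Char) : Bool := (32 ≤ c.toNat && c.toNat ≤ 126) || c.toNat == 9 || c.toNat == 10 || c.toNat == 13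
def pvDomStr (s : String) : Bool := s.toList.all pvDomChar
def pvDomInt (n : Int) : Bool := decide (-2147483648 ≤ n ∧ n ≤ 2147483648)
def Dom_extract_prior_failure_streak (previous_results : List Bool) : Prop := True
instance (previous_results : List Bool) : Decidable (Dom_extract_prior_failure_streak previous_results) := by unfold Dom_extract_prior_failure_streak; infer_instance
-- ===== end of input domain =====

-- ===== PORT A =====
-- reverse loop with break: recurse over the reversed list, stop at the first non-False
def pvGoA : List Bool → Int → Int
  | [], streak => streak
  | r :: rs, streak => if r = false then pvGoA rs (streak + 1) else streak

def extract_prior_failure_streak (previous_results : List Bool) : Int :=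
  if previous_results = [] then 0
  else pvGoA previous_results.reverse 0

-- ===== PORT B =====
-- forward single pass with a resettable counter
def extract_prior_failure_streak_alt (previous_results : List Bool) : Int :=
  previous_results.foldl (fun streak r => if r = false then streak + 1 else 0) 0

-- ===== PRECONDITION & SPEC =====
def Spec_extract_prior_failure_streak (previous_results : List Bool) (out : Int) : Prop := out = extract_prior_failure_streak_alt previous_results
instance (previous_results : List Bool) (out : Int) : Decidable (Spec_extract_prior_failure_streak previous_results out) := by unfold Spec_extract_prior_failure_streak; infer_instance

-- ===== CLAIM (what is proved, stated in full; the proofs are below) =====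
def Claim_equal_extract_prior_failure_streak : Prop := ∀ (previous_results : List Bool), Dom_extract_prior_failure_streak previous_results → Spec_extract_prior_failure_streak previous_results (extract_prior_failure_streak previous_results)

-- ===== LEMMAS AND PROOFS =====

-- ===== VERDICT (by name: the statement is the Claim_ definition above) =====
-- length of the leading False-run
def pvCtl : List Bool → Int
  | [] => 0
  | r :: rs => if r = false then 1 + pvCtl rs else 0

theorem pvGoA_eq (l : List Bool) : ∀ s : Int, pvGoA l s = s + pvCtl l := by
  induction l with
  | nil => intro s; simp [pvGoA, pvCtl]
  | cons r rs ih =>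
    intro s
    cases r <;> simp [pvGoA, pvCtl, ih] <;> ring

theorem pvFold_eq (l : List Bool) :
    l.foldl (fun streak r => if r = false then streak + 1 else 0) 0 = pvCtl l.reverse := by
  induction l using List.reverseRecOn with
  | nil => simp [pvCtl]
  | append_singleton l r ih =>
    cases r <;> simp [List.foldl_append, pvCtl, ih] <;> ring

theorem extract_prior_failure_streak_spec : Claim_equal_extract_prior_failure_streak := by
  intro l _
  unfold Spec_extract_prior_failure_streak extract_prior_failure_streak extract_prior_failure_streak_alt
  rw [pvFold_eq]
  by_cases h : l = []
  · simp [h, pvCtl]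
  · simp [h, pvGoA_eq]
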